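-- pv_equiv track=rewrite | github.com/NLP-Group-9/project2-part3 | html_parser.py | clean_ingredient_name
-- ===== SOURCE A (Python) =====
-- def clean_ingredient_name(name):
--     """
--     Cleans ingredient name by removing descriptors and preparation instructions.
--
--     Args:
--         name (str): Raw ingredient name
--
--     Returns:
--         str: Cleaned ingredient name
--     """
--     # common descriptors
--     descriptors = [
--         'whole wheat', 'whole grain', 'white', 'brown',
--         'fresh', 'frozen', 'canned', 'dried', 'dry',
--         'lean', 'extra-lean', 'ground',
--         'shredded', 'grated', 'sliced', 'diced', 'chopped', 'minced',
--         'crushed', 'peeled', 'unpeeled',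
--         'large', 'small', 'medium',
--         'ripe', 'unripe', 'firm',
--         'unsalted', 'salted', 'sweetened', 'unsweetened',
--         'raw', 'cooked',
--         'extra-virgin', 'virgin',
--         'low-fat', 'fat-free', 'reduced-fat',
--         'boneless', 'skinless'
--     ]
--
--     #common prep descriptions
--     prep_phrases = [
--         ', chopped', ', diced', ', minced', ', sliced', ', crushed',
--         ', peeled', ', grated', ', shredded',
--         ', or to taste', ', to taste', ', optional',
--         ', or as needed', ', as needed',
--         ', divided', ', plus more for',
--         ', softened', ', melted', ', room temperature',
--         ', drained', ', rinsed'
--     ]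
--
--     #remove preps
--     for phrase in prep_phrases:
--         if phrase in name.lower():
--             # Find the phrase and remove everything from that point
--             idx = name.lower().find(phrase)
--             name = name[:idx]
--
--     #remove descriptors
--     name_lower = name.lower()
--     for descriptor in descriptors:
--         # Check if name starts with this descriptor
--         if name_lower.startswith(descriptor + ' '):
--             # Remove the descriptor
--             name = name[len(descriptor):].strip()
--             name_lower = name.lower()
--
--     return name.strip()
-- ===== SOURCE B (Python) =====
-- # B: one-shot minimum-index truncation for prep phrases (instead of A's repeated
-- # sequential truncation) + recursion over the descriptor list (simpler decomposition).
--
-- DESCRIPTORS = [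
--     'whole wheat', 'whole grain', 'white', 'brown',
--     'fresh', 'frozen', 'canned', 'dried', 'dry',
--     'lean', 'extra-lean', 'ground',
--     'shredded', 'grated', 'sliced', 'diced', 'chopped', 'minced',
--     'crushed', 'peeled', 'unpeeled',
--     'large', 'small', 'medium',
--     'ripe', 'unripe', 'firm',
--     'unsalted', 'salted', 'sweetened', 'unsweetened',
--     'raw', 'cooked',
--     'extra-virgin', 'virgin',
--     'low-fat', 'fat-free', 'reduced-fat',
--     'boneless', 'skinless'
-- ]
--
-- PREP_PHRASES = [
--     ', chopped', ', diced', ', minced', ', sliced', ', crushed',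
--     ', peeled', ', grated', ', shredded',
--     ', or to taste', ', to taste', ', optional',
--     ', or as needed', ', as needed',
--     ', divided', ', plus more for',
--     ', softened', ', melted', ', room temperature',
--     ', drained', ', rinsed'
-- ]
--
--
-- def _strip_descriptors(name, ds):
--     if not ds:
--         return name
--     if name.lower().startswith(ds[0] + ' '):
--         name = name[len(ds[0]):].strip()
--     return _strip_descriptors(name, ds[1:])
--
--
-- def clean_ingredient_name(name):
--     low = name.lower()
--     cuts = [c for c in (low.find(p) for p in PREP_PHRASES) if c >= 0]
--     if cuts:
--         name = name[:min(cuts)]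
--     return _strip_descriptors(name, DESCRIPTORS).strip()
-- ===== Notes on version B (the rewrite author's own statement) =====
-- stated objective: simpler
-- what changed: B replaces A's sequential per-phrase truncation loop (which re-lowers and re-scans the shrinking string for each prep phrase) by a single pass that computes every phrase's first-occurrence index in the lowered string once and truncates once at the minimum, and replaces A's (name, name_lower) pair-state descriptor loop by plain structural recursion over the descriptor list.
import Mathlib
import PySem

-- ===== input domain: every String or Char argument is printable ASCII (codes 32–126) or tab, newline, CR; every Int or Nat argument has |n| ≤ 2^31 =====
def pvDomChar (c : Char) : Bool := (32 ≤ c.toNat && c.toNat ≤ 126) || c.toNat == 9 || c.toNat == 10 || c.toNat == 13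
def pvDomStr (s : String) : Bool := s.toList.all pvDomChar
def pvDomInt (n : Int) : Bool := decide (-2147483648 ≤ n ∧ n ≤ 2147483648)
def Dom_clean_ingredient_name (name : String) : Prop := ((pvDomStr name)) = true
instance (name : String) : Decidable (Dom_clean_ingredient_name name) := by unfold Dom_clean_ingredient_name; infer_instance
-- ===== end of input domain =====

-- B replaces A's sequential prep-phrase truncation loop by a single minimum-find truncation and the
-- descriptor loop by structural recursion over the descriptor list (objective: simpler decomposition).

def pvDescriptors : List String :=
  ["whole wheat", "whole grain", "white", "brown",
   "fresh", "frozen", "canned", "dried", "dry",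
   "lean", "extra-lean", "ground",
   "shredded", "grated", "sliced", "diced", "chopped", "minced",
   "crushed", "peeled", "unpeeled",
   "large", "small", "medium",
   "ripe", "unripe", "firm",
   "unsalted", "salted", "sweetened", "unsweetened",
   "raw", "cooked",
   "extra-virgin", "virgin",
   "low-fat", "fat-free", "reduced-fat",
   "boneless", "skinless"]

def pvPrepPhrases : List String :=
  [", chopped", ", diced", ", minced", ", sliced", ", crushed",
   ", peeled", ", grated", ", shredded",
   ", or to taste", ", to taste", ", optional",
   ", or as needed", ", as needed",
   ", divided", ", plus more for",
   ", softened", ", melted", ", room temperature",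
   ", drained", ", rinsed"]

-- ===== PORT A =====
def clean_ingredient_name (name : String) : String :=
  -- for phrase in prep_phrases: if phrase in name.lower(): name = name[:name.lower().find(phrase)]
  let name1 := pvPrepPhrases.foldl (fun nm phrase =>
    if PySem.Str.isIn phrase (PySem.Str.lower nm) then
      PySem.Str.slice nm none (some (PySem.Str.find (PySem.Str.lower nm) phrase))
    else nm) name
  -- name_lower = name.lower(); for descriptor in descriptors: strip matched prefix, refresh name_lower
  let st := pvDescriptors.foldl (fun (st : String × String) d =>
    if PySem.Str.startswith st.2 (d ++ " ") then
      let nm := PySem.Str.strip (PySem.Str.slice st.1 (some (PySem.Str.len d)) none)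
      (nm, PySem.Str.lower nm)
    else st) (name1, PySem.Str.lower name1)
  PySem.Str.strip st.1

-- ===== PORT B =====
def pvStripDescriptors : String → List String → String
  | nm, [] => nm
  | nm, d :: rest =>
      let nm' := if PySem.Str.startswith (PySem.Str.lower nm) (d ++ " ")
        then PySem.Str.strip (PySem.Str.slice nm (some (PySem.Str.len d)) none)
        else nm
      pvStripDescriptors nm' rest

def clean_ingredient_name_alt (name : String) : String :=
  let low := PySem.Str.lower name
  let cuts := (pvPrepPhrases.map (fun p => PySem.Str.find low p)).filter (fun c => 0 ≤ c)
  let name1 := match PySem.List.min? cuts (fun y => y) with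
    | some m => PySem.Str.slice name none (some m)
    | none => name
  PySem.Str.strip (pvStripDescriptors name1 pvDescriptors)

-- ===== PRECONDITION & SPEC =====
def Spec_clean_ingredient_name (name : String) (out : String) : Prop := out = clean_ingredient_name_alt name
instance (name : String) (out : String) : Decidable (Spec_clean_ingredient_name name out) := by unfold Spec_clean_ingredient_name; infer_instance

-- ===== CLAIM (what is proved, stated in full; the proofs are below) =====
def Claim_equal_clean_ingredient_name : Prop := ∀ (name : String), Dom_clean_ingredient_name name → Spec_clean_ingredient_name name (clean_ingredient_name name)

-- ===== LEMMAS AND PROOFS =====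

-- a prep phrase starts with ',' and has no further ','
def pvOkP (p : List Char) : Prop := p.head? = some ',' ∧ ',' ∉ p.tail

-- a cut index is the end of the string or sits on a ','
def pvGood (L : List Char) (c : ℕ) : Prop := c = L.length ∨ L[c]? = some ','

-- A's per-phrase step, tracked as a cut index into the fixed lowered list L
def pvStepTake (L : List Char) (c : ℕ) (p : List Char) : ℕ :=
  if PySem.Chars.isIn p (L.take c) then (PySem.Chars.find (L.take c) p).toNat else c

-- the same step expressed against the FULL list L
def pvStepMin (L : List Char) (c : ℕ) (p : List Char) : ℕ :=
  if PySem.Chars.isIn p L then min c (PySem.Chars.find L p).toNat else c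

lemma pv_ok_phrases : ∀ p ∈ pvPrepPhrases, pvOkP p.toList := by
  intro p hp
  fin_cases hp <;> exact ⟨by decide, by decide⟩

lemma pv_occ_of_occ_take {p L : List Char} {c i : ℕ} (h : p <+: (L.take c).drop i) :
    p <+: L.drop i := by
  rw [List.drop_take] at h
  exact h.trans (List.take_prefix _ _)

lemma pv_char_of_occ {p L : List Char} {i k : ℕ} (h : p <+: L.drop i) (hk : k < p.length) :
    L[i + k]? = p[k]? := by
  have hlen : k < (L.drop i).length := lt_of_lt_of_le hk h.length_le
  have hik : i + k < L.length := by simp at hlen; omega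
  have h2 := h.getElem (i := k) hk
  rw [List.getElem_drop] at h2
  rw [List.getElem?_eq_getElem hik, List.getElem?_eq_getElem hk, h2]

-- survival: under pvGood c, an occurrence of an ok phrase starting before c fits entirely before c
lemma pv_survive {p L : List Char} {c i : ℕ} (hp : pvOkP p) (hg : pvGood L c)
    (hocc : p <+: L.drop i) (hi : i < c) : p <+: (L.take c).drop i := by
  obtain ⟨t, rfl, hnc⟩ : ∃ t, p = ',' :: t ∧ ',' ∉ t := by
    cases p with
    | nil => simp [pvOkP] at hp
    | cons a t =>
      obtain ⟨h1, h2⟩ := hp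
      simp only [List.head?_cons, Option.some.injEq] at h1
      exact ⟨t, by simp [h1], by simpa using h2⟩
  rw [List.drop_take, List.prefix_take_iff]
  refine ⟨hocc, ?_⟩
  by_contra hlen
  push_neg at hlen
  have hkp : c - i < t.length + 1 := by simpa using hlen
  have hLc : L[c]? = (',' :: t)[c - i]? := by
    have h3 := pv_char_of_occ hocc (k := c - i) (by simpa using hkp)
    rwa [show i + (c - i) = c by omega] at h3
  have hlen2 : t.length + 1 ≤ L.length - i := by simpa using hocc.length_le
  have hclen : c < L.length := by omega
  rcases hg with h | h
  · omega
  · rw [h] at hLc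
    have hk1 : c - i = (c - i - 1) + 1 := by omega
    rw [hk1, List.getElem?_cons_succ] at hLc
    exact hnc (List.mem_of_getElem? hLc.symm)

-- occurrence in L.take c yields an occurrence of p in L starting before c (p nonempty)
lemma pv_occ_lt {p L : List Char} {c i : ℕ} (hpne : p ≠ [])
    (h : p <+: (L.take c).drop i) : i < c := by
  have h1 : 1 ≤ p.length := by cases p <;> simp_all
  have h2 := h.length_le
  have h3 := List.length_take_le c L
  have h4 := List.length_drop (l := L.take c) (i := i)
  omega

-- p occurs in L.take c  ↔  p occurs in L with first occurrence strictly before c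
lemma pv_isIn_take_iff {p L : List Char} {c : ℕ} (hp : pvOkP p) (hg : pvGood L c) :
    PySem.Chars.isIn p (L.take c) = true ↔
      (PySem.Chars.isIn p L = true ∧ (PySem.Chars.find L p).toNat < c) := by
  have hpne : p ≠ [] := by rcases hp with ⟨h1, -⟩; cases p <;> simp_all
  constructor
  · intro h
    obtain ⟨j, hocc⟩ := (PySem.Chars.exists_prefix_drop_iff_isIn p (L.take c)).2 h
    have hoccL := pv_occ_of_occ_take hocc
    have hIn : PySem.Chars.isIn p L = true :=
      (PySem.Chars.exists_prefix_drop_iff_isIn p L).1 ⟨j, hoccL⟩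
    have hf0 : 0 ≤ PySem.Chars.find L p := (PySem.Chars.find_nonneg_iff L p).2
      ((PySem.Chars.isIn_iff_infix p L).1 hIn)
    obtain ⟨-, hfmin⟩ := PySem.Chars.find_spec hf0
    have hjc : j < c := pv_occ_lt hpne hocc
    have hfj : (PySem.Chars.find L p).toNat ≤ j := by
      by_contra hlt
      exact hfmin j (by omega) hoccL
    exact ⟨hIn, by omega⟩
  · rintro ⟨hIn, hfc⟩
    have hf0 : 0 ≤ PySem.Chars.find L p := (PySem.Chars.find_nonneg_iff L p).2
      ((PySem.Chars.isIn_iff_infix p L).1 hIn)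
    obtain ⟨hfocc, -⟩ := PySem.Chars.find_spec hf0
    exact (PySem.Chars.exists_prefix_drop_iff_isIn p (L.take c)).1
      ⟨_, pv_survive hp hg hfocc hfc⟩

-- and then the find in the truncated list is the find in the full list
lemma pv_find_take {p L : List Char} {c : ℕ} (hp : pvOkP p) (hg : pvGood L c)
    (h : PySem.Chars.isIn p (L.take c) = true) :
    PySem.Chars.find (L.take c) p = PySem.Chars.find L p := by
  obtain ⟨hIn, hfc⟩ := (pv_isIn_take_iff hp hg).1 h
  have hf0 : 0 ≤ PySem.Chars.find L p := (PySem.Chars.find_nonneg_iff L p).2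
    ((PySem.Chars.isIn_iff_infix p L).1 hIn)
  have hg0 : 0 ≤ PySem.Chars.find (L.take c) p := (PySem.Chars.find_nonneg_iff _ p).2
    ((PySem.Chars.isIn_iff_infix p _).1 h)
  obtain ⟨hfocc, hfmin⟩ := PySem.Chars.find_spec hf0
  obtain ⟨hgocc, hgmin⟩ := PySem.Chars.find_spec hg0
  have h1 : (PySem.Chars.find L p).toNat ≤ (PySem.Chars.find (L.take c) p).toNat := by
    by_contra hlt
    exact hfmin _ (by omega) (pv_occ_of_occ_take hgocc)
  have h2 : (PySem.Chars.find (L.take c) p).toNat ≤ (PySem.Chars.find L p).toNat := by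
    by_contra hlt
    exact hgmin _ (by omega) (pv_survive hp hg hfocc hfc)
  omega

lemma pv_step_eq {L p : List Char} {c : ℕ} (hp : pvOkP p) (hg : pvGood L c) :
    pvStepTake L c p = pvStepMin L c p ∧ pvGood L (pvStepMin L c p) ∧ pvStepMin L c p ≤ c := by
  by_cases hIn : PySem.Chars.isIn p L = true
  · by_cases hfc : (PySem.Chars.find L p).toNat < c
    · have hT : PySem.Chars.isIn p (L.take c) = true := (pv_isIn_take_iff hp hg).2 ⟨hIn, hfc⟩
      have hmin : min c (PySem.Chars.find L p).toNat = (PySem.Chars.find L p).toNat := by omega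
      have hgood : pvGood L (PySem.Chars.find L p).toNat := by
        have hf0 : 0 ≤ PySem.Chars.find L p := (PySem.Chars.find_nonneg_iff L p).2
          ((PySem.Chars.isIn_iff_infix p L).1 hIn)
        obtain ⟨hfocc, -⟩ := PySem.Chars.find_spec hf0
        obtain ⟨t, rfl, -⟩ : ∃ t, p = ',' :: t ∧ ',' ∉ t := by
          obtain ⟨h1, h2⟩ := hp
          cases p with
          | nil => simp at h1
          | cons a t =>
            simp only [List.head?_cons, Option.some.injEq] at h1
            exact ⟨t, by simp [h1], by simpa using h2⟩
        right
        have h3 := pv_char_of_occ hfocc (k := 0) (by simp)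
        simpa using h3
      refine ⟨?_, ?_, ?_⟩
      · simp [pvStepTake, pvStepMin, hT, hIn, hmin, pv_find_take hp hg hT]
      · simpa [pvStepMin, hIn, hmin] using hgood
      · simp only [pvStepMin, if_pos hIn]
        omega
    · have hT : ¬ PySem.Chars.isIn p (L.take c) = true := by
        intro h
        exact hfc ((pv_isIn_take_iff hp hg).1 h).2
      have hmin : min c (PySem.Chars.find L p).toNat = c := by omega
      refine ⟨by simp [pvStepTake, pvStepMin, hT, hIn, hmin], ?_, ?_⟩
      · simpa [pvStepMin, hIn, hmin] using hg
      · simp [pvStepMin, hIn, hmin]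
  · have hT : ¬ PySem.Chars.isIn p (L.take c) = true := by
      intro h
      exact hIn ((pv_isIn_take_iff hp hg).1 h).1
    refine ⟨by simp [pvStepTake, pvStepMin, hT, hIn], ?_, ?_⟩
    · simpa [pvStepMin, hIn] using hg
    · simp [pvStepMin, hIn]

lemma pv_fold_eq (L : List Char) : ∀ (P : List (List Char)), (∀ p ∈ P, pvOkP p) →
    ∀ c : ℕ, pvGood L c →
    P.foldl (pvStepTake L) c = P.foldl (pvStepMin L) c := by
  intro P
  induction P with
  | nil => intro _ c _; rfl
  | cons p P ih =>
    intro hP c hg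
    obtain ⟨h1, h2, -⟩ := pv_step_eq (hP p (by simp)) hg
    simp only [List.foldl_cons, h1]
    exact ih (fun q hq => hP q (by simp [hq])) _ h2

-- phase 1 of A, tracked as a cut index
lemma pv_phase1A : ∀ (P : List String) (s : List Char) (nm : String) (c : ℕ)
    (hnm : nm.toList = s.take c),
    (P.foldl (fun nm phrase =>
      if PySem.Str.isIn phrase (PySem.Str.lower nm) then
        PySem.Str.slice nm none (some (PySem.Str.find (PySem.Str.lower nm) phrase))
      else nm) nm).toList =
    s.take ((P.map String.toList).foldl (pvStepTake (PySem.Chars.lower s)) c) := by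
  intro P
  induction P with
  | nil => intro s nm c hnm; simpa using hnm
  | cons p P ih =>
    intro s nm c hnm
    have hlow : (PySem.Str.lower nm).toList = (PySem.Chars.lower s).take c := by
      rw [PySem.Str.toList_lower, hnm, PySem.Chars.lower, PySem.Chars.lower, List.map_take]
    simp only [List.foldl_cons, List.map_cons]
    by_cases h : PySem.Chars.isIn p.toList ((PySem.Chars.lower s).take c) = true
    · have hguard : PySem.Str.isIn p (PySem.Str.lower nm) = true := by
        rw [PySem.Str.isIn_eq, hlow]; exact h
      have hfind : PySem.Str.find (PySem.Str.lower nm) p =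
          PySem.Chars.find ((PySem.Chars.lower s).take c) p.toList := by
        rw [PySem.Str.find_eq, hlow]
      have hf0 : 0 ≤ PySem.Chars.find ((PySem.Chars.lower s).take c) p.toList :=
        (PySem.Chars.find_nonneg_iff _ _).2 ((PySem.Chars.isIn_iff_infix _ _).1 h)
      have hfle : (PySem.Chars.find ((PySem.Chars.lower s).take c) p.toList).toNat ≤ c := by
        have h1 := PySem.Chars.find_le_length ((PySem.Chars.lower s).take c) p.toList
        have h2 := List.length_take_le c (PySem.Chars.lower s)
        omega
      rw [hguard]
      simp only [if_true]
      have hstep : pvStepTake (PySem.Chars.lower s) c p.toList =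
          (PySem.Chars.find ((PySem.Chars.lower s).take c) p.toList).toNat := by
        simp [pvStepTake, h]
      rw [hstep]
      apply ih
      rw [PySem.Str.toList_slice, hfind]
      have hsl : PySem.Chars.slice nm.toList none
          (some (PySem.Chars.find ((PySem.Chars.lower s).take c) p.toList)) =
          nm.toList.take (PySem.Chars.find ((PySem.Chars.lower s).take c) p.toList).toNat :=
        PySem.List.slice_to _ hf0
      rw [hsl, hnm, List.take_take]
      congr 1
      omega
    · have hguard : ¬ PySem.Str.isIn p (PySem.Str.lower nm) = true := by
        rw [PySem.Str.isIn_eq, hlow]; exact fun hh => h hh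
      rw [if_neg hguard]
      have hstep : pvStepTake (PySem.Chars.lower s) c p.toList = c := by
        simp [pvStepTake, h]
      rw [hstep]
      exact ih s nm c hnm

-- the pvStepMin fold is the fold of min over the nonnegative finds
lemma pv_min_fold (L : List Char) (g : String → Int)
    (hg : ∀ p, g p = PySem.Chars.find L p.toList) : ∀ (P : List String) (c : ℕ),
    (P.map String.toList).foldl (pvStepMin L) c =
    ((P.map g).filter (fun x => decide (0 ≤ x))).foldl (fun c f => min c f.toNat) c := by
  intro P
  induction P with
  | nil => intro c; rfl
  | cons p P ih =>
    intro c
    by_cases h : PySem.Chars.isIn p.toList L = true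
    · have hf0 : 0 ≤ g p := by
        rw [hg]
        exact (PySem.Chars.find_nonneg_iff _ _).2 ((PySem.Chars.isIn_iff_infix _ _).1 h)
      have hstep : pvStepMin L c p.toList = min c (g p).toNat := by
        simp [pvStepMin, h, hg p]
      have hfc : List.filter (fun x => decide (0 ≤ x)) (g p :: List.map g P) =
          g p :: List.filter (fun x => decide (0 ≤ x)) (List.map g P) := by
        simp [hf0]
      rw [List.map_cons, List.map_cons, List.foldl_cons, hfc, List.foldl_cons, hstep]
      exact ih _
    · have hf0 : ¬ 0 ≤ g p := by
        rw [hg]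
        intro hh
        exact h ((PySem.Chars.isIn_iff_infix _ _).2 ((PySem.Chars.find_nonneg_iff _ _).1 hh))
      have hstep : pvStepMin L c p.toList = c := by
        simp [pvStepMin, h]
      have hfc : List.filter (fun x => decide (0 ≤ x)) (g p :: List.map g P) =
          List.filter (fun x => decide (0 ≤ x)) (List.map g P) := by
        simp [hf0]
      rw [List.map_cons, List.map_cons, List.foldl_cons, hfc, hstep]
      exact ih _

-- Int min-fold versus the Nat min-fold
lemma pv_int_nat_fold : ∀ (t : List Int) (x : Int),
    (t.foldl min x).toNat = t.foldl (fun c f => min c f.toNat) x.toNat := by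
  intro t
  induction t with
  | nil => intro x; rfl
  | cons y t ih =>
    intro x
    simp only [List.foldl_cons]
    rw [ih (min x y)]
    congr 1
    omega

-- phase 2: the (name, name_lower) pair fold of A is B's structural recursion
lemma pv_phase2 : ∀ (ds : List String) (nm : String),
    (ds.foldl (fun (st : String × String) d =>
      if PySem.Str.startswith st.2 (d ++ " ") then
        let nm := PySem.Str.strip (PySem.Str.slice st.1 (some (PySem.Str.len d)) none)
        (nm, PySem.Str.lower nm)
      else st) (nm, PySem.Str.lower nm)).1 = pvStripDescriptors nm ds := by
  intro ds
  induction ds with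
  | nil => intro nm; rfl
  | cons d ds ih =>
    intro nm
    simp only [List.foldl_cons, pvStripDescriptors]
    by_cases h : PySem.Str.startswith (PySem.Str.lower nm) (d ++ " ") = true
    · rw [if_pos h, if_pos h]
      exact ih _
    · rw [if_neg h, if_neg h]
      exact ih nm

-- the two phase-1 results coincide as strings
lemma pv_phase1_eq (name : String) :
    (pvPrepPhrases.foldl (fun nm phrase =>
      if PySem.Str.isIn phrase (PySem.Str.lower nm) then
        PySem.Str.slice nm none (some (PySem.Str.find (PySem.Str.lower nm) phrase))
      else nm) name) =
    (match PySem.List.min? ((pvPrepPhrases.map (fun p =>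
        PySem.Str.find (PySem.Str.lower name) p)).filter (fun c => 0 ≤ c)) (fun y => y) with
      | some m => PySem.Str.slice name none (some m)
      | none => name) := by
  apply String.toList_inj.mp
  have hA := pv_phase1A pvPrepPhrases name.toList name name.toList.length (by simp)
  have hLlen : (PySem.Chars.lower name.toList).length = name.toList.length := by
    simp [PySem.Chars.lower]
  rw [hA, pv_fold_eq (PySem.Chars.lower name.toList) (pvPrepPhrases.map String.toList)
    (by intro p hp; obtain ⟨q, hq, rfl⟩ := List.mem_map.1 hp; exact pv_ok_phrases q hq)
    name.toList.length (Or.inl hLlen.symm),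
    pv_min_fold (PySem.Chars.lower name.toList)
      (fun p => PySem.Str.find (PySem.Str.lower name) p)
      (fun p => by simp only [PySem.Str.find_eq, PySem.Str.toList_lower]) pvPrepPhrases]
  cases hc : (pvPrepPhrases.map (fun p =>
      PySem.Str.find (PySem.Str.lower name) p)).filter (fun x => decide (0 ≤ x)) with
  | nil => simp [PySem.List.min?]
  | cons x t =>
    have hmem : ∀ y ∈ x :: t, 0 ≤ y := by
      intro y hy
      have := List.mem_filter.1 (hc ▸ hy)
      simpa using this.2
    have hm0 : 0 ≤ t.foldl min x := by
      rcases PySem.List.foldl_min_mem t x with h | h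
      · rw [h]; exact hmem x (by simp)
      · exact hmem _ (List.mem_cons_of_mem _ h)
    have hxle : x.toNat ≤ name.toList.length := by
      have hx : x ∈ (pvPrepPhrases.map (fun p =>
          PySem.Str.find (PySem.Str.lower name) p)).filter (fun x => decide (0 ≤ x)) :=
        hc ▸ List.mem_cons_self
      obtain ⟨p, -, rfl⟩ := List.mem_map.1 (List.mem_of_mem_filter hx)
      have h1 := PySem.Chars.find_le_length (PySem.Chars.lower name.toList) p.toList
      have h2 : PySem.Str.find (PySem.Str.lower name) p =
          PySem.Chars.find (PySem.Chars.lower name.toList) p.toList := by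
        rw [PySem.Str.find_eq, PySem.Str.toList_lower]
      rw [h2]
      omega
    have hsl : PySem.Chars.slice name.toList none (some (t.foldl min x)) =
        name.toList.take (t.foldl min x).toNat := PySem.List.slice_to _ hm0
    rw [PySem.List.min?_id_cons]
    simp only [List.foldl_cons]
    rw [PySem.Str.toList_slice, hsl, pv_int_nat_fold,
      show min name.toList.length x.toNat = x.toNat by omega]

-- ===== VERDICT (by name: the statement is the Claim_ definition above) =====
theorem clean_ingredient_name_spec : Claim_equal_clean_ingredient_name := by
  intro name _
  show clean_ingredient_name name = clean_ingredient_name_alt name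
  show PySem.Str.strip ((pvDescriptors.foldl (fun (st : String × String) d =>
      if PySem.Str.startswith st.2 (d ++ " ") then
        let nm := PySem.Str.strip (PySem.Str.slice st.1 (some (PySem.Str.len d)) none)
        (nm, PySem.Str.lower nm)
      else st) (pvPrepPhrases.foldl (fun nm phrase =>
        if PySem.Str.isIn phrase (PySem.Str.lower nm) then
          PySem.Str.slice nm none (some (PySem.Str.find (PySem.Str.lower nm) phrase))
        else nm) name, PySem.Str.lower (pvPrepPhrases.foldl (fun nm phrase =>
        if PySem.Str.isIn phrase (PySem.Str.lower nm) then
          PySem.Str.slice nm none (some (PySem.Str.find (PySem.Str.lower nm) phrase))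
        else nm) name))).1) =
    PySem.Str.strip (pvStripDescriptors (match PySem.List.min? ((pvPrepPhrases.map (fun p =>
        PySem.Str.find (PySem.Str.lower name) p)).filter (fun c => 0 ≤ c)) (fun y => y) with
      | some m => PySem.Str.slice name none (some m)
      | none => name) pvDescriptors)
  rw [pv_phase2, pv_phase1_eq name]
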